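-- pv_equiv track=rewrite | github.com/nrhchnd1412/python-dsa | patterns/dynamic programming/last cell min cost/app.py | min_cost_path_with_diagonal
-- ===== SOURCE A (Python) =====
-- def min_cost_path_with_diagonal(cost):
--     # time, space = O(m*n)
--     rows=len(cost)
--     cols= len(cost[0])
--     dp=[[0]*cols for _ in range(rows)]
--     dp[0][0]=cost[0][0]
--     # set first row
--     for i in range(1,cols):
--         dp[0][i]=dp[0][i-1]+cost[0][i]
--
--     # set first column
--     for i in range(1,rows):
--         dp[i][0]=cost[i][0]+dp[i-1][0]
--
--     # set rest of the table
--
--     for i in range(1,rows):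
--         for j in range(1,cols):
--             dp[i][j]=cost[i][j]+min(dp[i][j-1],dp[i-1][j],dp[i-1][j-1])
--     return dp[rows-1][cols-1]
-- ===== SOURCE B (Python) =====
-- def min_cost_path_with_diagonal(cost):
--     # top-down memoized recursion from the target cell instead of A's staged bottom-up table fill
--     memo = {}
--
--     def go(i, j):
--         if (i, j) in memo:
--             return memo[(i, j)]
--         if i == 0 and j == 0:
--             v = cost[0][0]
--         elif i == 0:
--             v = cost[0][j] + go(0, j - 1)
--         elif j == 0:
--             v = cost[i][0] + go(i - 1, 0)
--         else:
--             v = cost[i][j] + min(go(i, j - 1), go(i - 1, j), go(i - 1, j - 1))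
--         memo[(i, j)] = v
--         return v
--
--     return go(len(cost) - 1, len(cost[0]) - 1)
-- ===== Notes on version B (the rewrite author's own statement) =====
-- stated objective: alternative
-- what changed: Replaces A's staged bottom-up table fill (corner, first-row loop, first-column loop, nested fill over a full m*n table) by demand-driven top-down recursion from the target cell with a memo dictionary; no table is allocated and cells are computed only when a recursive call needs them.
import Mathlib
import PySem

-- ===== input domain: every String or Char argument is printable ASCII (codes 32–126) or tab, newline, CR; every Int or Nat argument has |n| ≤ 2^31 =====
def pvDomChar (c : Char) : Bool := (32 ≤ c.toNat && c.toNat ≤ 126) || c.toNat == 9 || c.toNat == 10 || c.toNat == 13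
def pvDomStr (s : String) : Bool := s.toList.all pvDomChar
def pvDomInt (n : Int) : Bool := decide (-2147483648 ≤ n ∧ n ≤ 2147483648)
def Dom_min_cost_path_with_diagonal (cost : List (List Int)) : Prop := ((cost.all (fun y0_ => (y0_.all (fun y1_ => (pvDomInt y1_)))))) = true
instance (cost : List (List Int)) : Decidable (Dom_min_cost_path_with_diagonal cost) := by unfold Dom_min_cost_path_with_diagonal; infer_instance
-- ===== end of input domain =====

-- B replaces A's staged bottom-up m*n table fill by demand-driven top-down memoized recursion from the target cell.

-- ===== PORT A =====
-- 2-D table read/write helpers; all indices are in range under Pre_ (getD's default is never returned there)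
def pvGet2 (dp : List (List Int)) (i j : Nat) : Int := (dp.getD i []).getD j 0
def pvSet2 (dp : List (List Int)) (i j : Nat) (v : Int) : List (List Int) :=
  dp.set i ((dp.getD i []).set j v)

def min_cost_path_with_diagonal (cost : List (List Int)) : Int :=
  let rows := cost.length
  let cols := (cost.getD 0 []).length       -- len(cost[0]); cost ≠ [] under Pre_
  let dp0 := List.replicate rows (List.replicate cols 0)
  let dp1 := pvSet2 dp0 0 0 (pvGet2 cost 0 0)
  -- set first row: for i in range(1, cols)
  let dp2 := (List.range' 1 (cols - 1)).foldl
      (fun dp i => pvSet2 dp 0 i (pvGet2 dp 0 (i-1) + pvGet2 cost 0 i)) dp1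
  -- set first column: for i in range(1, rows)
  let dp3 := (List.range' 1 (rows - 1)).foldl
      (fun dp i => pvSet2 dp i 0 (pvGet2 cost i 0 + pvGet2 dp (i-1) 0)) dp2
  -- set rest of the table
  let dp4 := (List.range' 1 (rows - 1)).foldl
      (fun dp i => (List.range' 1 (cols - 1)).foldl
        (fun dp j => pvSet2 dp i j
          (pvGet2 cost i j +
            min (min (pvGet2 dp i (j-1)) (pvGet2 dp (i-1) j)) (pvGet2 dp (i-1) (j-1)))) dp) dp3
  pvGet2 dp4 (rows - 1) (cols - 1)

-- ===== PORT B =====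
-- B's inner function go(i, j): memoized recursion; the memo dict is threaded as explicit state
def pvGo (cost : List (List Int)) (i j : Nat)
    (memo : PySem.Dict (Nat × Nat) Int) : Int × PySem.Dict (Nat × Nat) Int :=
  match memo.get? (i, j) with
  | some v => (v, memo)
  | none =>
    match i, j with
    | 0, 0 =>
      let v := pvGet2 cost 0 0
      (v, memo.insert (0, 0) v)
    | 0, j'+1 =>
      let r := pvGo cost 0 j' memo
      let v := pvGet2 cost 0 (j'+1) + r.1
      (v, r.2.insert (0, j'+1) v)
    | i'+1, 0 =>
      let r := pvGo cost i' 0 memo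
      let v := pvGet2 cost (i'+1) 0 + r.1
      (v, r.2.insert (i'+1, 0) v)
    | i'+1, j'+1 =>
      let r1 := pvGo cost (i'+1) j' memo
      let r2 := pvGo cost i' (j'+1) r1.2
      let r3 := pvGo cost i' j' r2.2
      let v := pvGet2 cost (i'+1) (j'+1) + min (min r1.1 r2.1) r3.1
      (v, r3.2.insert (i'+1, j'+1) v)
  termination_by (i, j)

def min_cost_path_with_diagonal_alt (cost : List (List Int)) : Int :=
  (pvGo cost (cost.length - 1) ((cost.getD 0 []).length - 1) PySem.Dict.empty).1

-- ===== PRECONDITION & SPEC =====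
-- Pre_: exactly the inputs where Python A returns (cost nonempty, first row nonempty,
-- every row at least as long as the first — otherwise A raises IndexError).
def Pre_min_cost_path_with_diagonal (cost : List (List Int)) : Prop :=
  cost ≠ [] ∧ 0 < (cost.getD 0 []).length ∧
    ∀ row ∈ cost, (cost.getD 0 []).length ≤ row.length
instance (cost : List (List Int)) : Decidable (Pre_min_cost_path_with_diagonal cost) := by
  unfold Pre_min_cost_path_with_diagonal; infer_instance

def pvWitness_min_cost_path_with_diagonal : List (List Int) := [[1, 2], [3, 4]]

def Spec_min_cost_path_with_diagonal (cost : List (List Int)) (out : Int) : Prop := out = min_cost_path_with_diagonal_alt cost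
instance (cost : List (List Int)) (out : Int) : Decidable (Spec_min_cost_path_with_diagonal cost out) := by unfold Spec_min_cost_path_with_diagonal; infer_instance

-- ===== CLAIM (what is proved, stated in full; the proofs are below) =====
def Claim_equal_min_cost_path_with_diagonal : Prop := ∀ (cost : List (List Int)), Dom_min_cost_path_with_diagonal cost → Pre_min_cost_path_with_diagonal cost → Spec_min_cost_path_with_diagonal cost (min_cost_path_with_diagonal cost)

-- ===== LEMMAS AND PROOFS =====

-- the common cell recurrence both programs compute
def pvD (cost : List (List Int)) : Nat → Nat → Int
  | 0, 0 => pvGet2 cost 0 0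
  | 0, j+1 => pvD cost 0 j + pvGet2 cost 0 (j+1)
  | i+1, 0 => pvGet2 cost (i+1) 0 + pvD cost i 0
  | i+1, j+1 => pvGet2 cost (i+1) (j+1) +
      min (min (pvD cost (i+1) j) (pvD cost i (j+1))) (pvD cost i j)
  termination_by i j => (i, j)

theorem pvRange'_concat (s n : Nat) : List.range' s (n+1) = List.range' s n ++ [s+n] := by
  have := List.range'_concat (s := s) (n := n) (step := 1)
  simpa using this

theorem pvGetD_set_self {α : Type} (l : List α) (n : Nat) (a d : α) (h : n < l.length) :
    (l.set n a).getD n d = a := by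
  simp [List.getD, h]

theorem pvGetD_set_ne {α : Type} (l : List α) {n m : Nat} (a d : α) (h : n ≠ m) :
    (l.set n a).getD m d = l.getD m d := by
  simp [List.getD, List.getElem?_set_ne h]

-- table characterisation: shape R×C with cell contents f
def pvTab (dp : List (List Int)) (R C : Nat) (f : Nat → Nat → Int) : Prop :=
  dp.length = R ∧ (∀ i, i < R → (dp.getD i []).length = C) ∧
    (∀ i j, i < R → j < C → pvGet2 dp i j = f i j)

theorem pvTab_congr {dp : List (List Int)} {R C : Nat} {f g : Nat → Nat → Int}
    (h : pvTab dp R C f) (hfg : ∀ i j, i < R → j < C → f i j = g i j) :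
    pvTab dp R C g := by
  obtain ⟨h1, h2, h3⟩ := h
  exact ⟨h1, h2, fun i j hi hj => (h3 i j hi hj).trans (hfg i j hi hj)⟩

theorem pvTab_init (R C : Nat) :
    pvTab (List.replicate R (List.replicate C 0)) R C (fun _ _ => 0) := by
  refine ⟨List.length_replicate, ?_, ?_⟩
  · intro i hi
    simp [List.getD, hi]
  · intro i j hi hj
    simp [pvGet2, List.getD, hi, hj]

theorem pvTab_set {dp : List (List Int)} {R C : Nat} {f : Nat → Nat → Int}
    (h : pvTab dp R C f) {i j : Nat} (hi : i < R) (hj : j < C) (v : Int) :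
    pvTab (pvSet2 dp i j v) R C
      (fun i' j' => if i' = i ∧ j' = j then v else f i' j') := by
  obtain ⟨h1, h2, h3⟩ := h
  have hilen : i < dp.length := by omega
  have hjlen : j < (dp.getD i []).length := by rw [h2 i hi]; omega
  have hrow : ∀ i', (pvSet2 dp i j v).getD i' [] =
      if i = i' then (dp.getD i []).set j v else dp.getD i' [] := by
    intro i'
    unfold pvSet2
    by_cases hii : i = i'
    · subst hii; rw [if_pos rfl]; exact pvGetD_set_self dp i _ [] hilen
    · rw [if_neg hii]; exact pvGetD_set_ne dp _ [] hii
  refine ⟨by simp [pvSet2, h1], ?_, ?_⟩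
  · intro i' hi'
    rw [hrow i']
    by_cases hii : i = i'
    · rw [if_pos hii, List.length_set]; exact h2 i hi
    · rw [if_neg hii]; exact h2 i' hi'
  · intro i' j' hi' hj'
    beta_reduce
    unfold pvGet2
    rw [hrow i']
    by_cases hii : i = i'
    · rw [if_pos hii]
      subst hii
      by_cases hjj : j = j'
      · subst hjj
        rw [pvGetD_set_self _ _ _ _ hjlen, if_pos ⟨rfl, rfl⟩]
      · rw [pvGetD_set_ne _ _ _ hjj, if_neg (by tauto)]
        have := h3 i j' hi' hj'
        unfold pvGet2 at this
        exact this
    · rw [if_neg hii, if_neg (by tauto)]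
      have := h3 i' j' hi' hj'
      unfold pvGet2 at this
      exact this

-- ---- A-side: the four phases of the table fill ----

theorem pvPhase1 (cost : List (List Int)) (R C : Nat) (hR : 0 < R) (hC : 0 < C) :
    ∀ k, k ≤ C - 1 →
    pvTab ((List.range' 1 k).foldl
        (fun dp i => pvSet2 dp 0 i (pvGet2 dp 0 (i-1) + pvGet2 cost 0 i))
        (pvSet2 (List.replicate R (List.replicate C 0)) 0 0 (pvGet2 cost 0 0))) R C
      (fun i j => if i = 0 ∧ j ≤ k then pvD cost 0 j else 0) := by
  intro k
  induction k with
  | zero =>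
    intro _
    rw [List.range'_zero, List.foldl_nil]
    refine pvTab_congr (pvTab_set (pvTab_init R C) hR hC (pvGet2 cost 0 0)) ?_
    intro i j _ _
    by_cases hij : i = 0 ∧ j = 0
    · obtain ⟨hi0, hj0⟩ := hij; subst hi0; subst hj0
      rw [if_pos ⟨rfl, rfl⟩, if_pos (by omega)]
      simp [pvD]
    · rw [if_neg hij, if_neg (by omega)]
  | succ n ihn =>
    intro hk
    have ih := ihn (by omega)
    rw [pvRange'_concat, List.foldl_append, List.foldl_cons, List.foldl_nil]
    rw [show (1 + n - 1 : Nat) = n from by omega]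
    have hstep := ih.2.2 0 n hR (by omega)
    beta_reduce at hstep
    rw [if_pos (by omega : (0:Nat) = 0 ∧ n ≤ n)] at hstep
    rw [hstep]
    refine pvTab_congr (pvTab_set ih hR (by omega : 1 + n < C) _) ?_
    intro i j hi hj
    beta_reduce
    by_cases h1 : i = 0 ∧ j = 1 + n
    · obtain ⟨hi0, hjj⟩ := h1; subst hi0; subst hjj
      rw [if_pos ⟨rfl, rfl⟩, if_pos (by omega)]
      rw [show (1 + n : Nat) = n + 1 from by omega]
      simp [pvD]
    · rw [if_neg h1]
      by_cases h2 : i = 0 ∧ j ≤ n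
      · rw [if_pos h2, if_pos (by omega)]
      · rw [if_neg h2, if_neg (by omega)]

theorem pvPhase2 (cost : List (List Int)) (R C : Nat) (hR : 0 < R) (hC : 0 < C)
    (dp0 : List (List Int)) (h : pvTab dp0 R C (fun i j => if i = 0 then pvD cost 0 j else 0)) :
    ∀ k, k ≤ R - 1 →
    pvTab ((List.range' 1 k).foldl
        (fun dp i => pvSet2 dp i 0 (pvGet2 cost i 0 + pvGet2 dp (i-1) 0)) dp0) R C
      (fun i j => if i = 0 then pvD cost 0 j else if j = 0 ∧ i ≤ k then pvD cost i 0 else 0) := by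
  intro k
  induction k with
  | zero =>
    intro _
    rw [List.range'_zero, List.foldl_nil]
    refine pvTab_congr h ?_
    intro i j _ _
    by_cases h1 : i = 0
    · rw [if_pos h1, if_pos h1]
    · rw [if_neg h1, if_neg h1, if_neg (by omega)]
  | succ n ihn =>
    intro hk
    have ih := ihn (by omega)
    rw [pvRange'_concat, List.foldl_append, List.foldl_cons, List.foldl_nil]
    rw [show (1 + n - 1 : Nat) = n from by omega]
    have hstep := ih.2.2 n 0 (by omega) hC
    beta_reduce at hstep
    have hstep' : pvGet2 ((List.range' 1 n).foldl
        (fun dp i => pvSet2 dp i 0 (pvGet2 cost i 0 + pvGet2 dp (i-1) 0)) dp0) n 0 =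
        pvD cost n 0 := by
      rw [hstep]
      by_cases hn : n = 0
      · subst hn; simp
      · rw [if_neg hn, if_pos (by omega)]
    rw [hstep']
    refine pvTab_congr (pvTab_set ih (by omega : 1 + n < R) hC _) ?_
    intro i j hi hj
    beta_reduce
    by_cases h1 : i = 1 + n ∧ j = 0
    · obtain ⟨hi0, hjj⟩ := h1; subst hi0; subst hjj
      rw [if_pos ⟨rfl, rfl⟩]
      rw [show (1 + n : Nat) = n + 1 from by omega]
      rw [if_neg (by omega : ¬ (n + 1 = 0)),
          if_pos (by omega : (0:Nat) = 0 ∧ n + 1 ≤ n + 1)]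
      simp [pvD]
    · rw [if_neg h1]
      by_cases h2 : i = 0
      · rw [if_pos h2, if_pos h2]
      · rw [if_neg h2, if_neg h2]
        by_cases h3 : j = 0 ∧ i ≤ n
        · rw [if_pos h3, if_pos (by omega)]
        · rw [if_neg h3, if_neg (by omega)]

def pvFRow (cost : List (List Int)) (r i j : Nat) : Int :=
  if i ≤ r then pvD cost i j else if j = 0 then pvD cost i 0 else 0

def pvFCell (cost : List (List Int)) (r m i j : Nat) : Int :=
  if i < r then pvD cost i j
  else if i = r then (if j ≤ m then pvD cost r j else 0)
  else if j = 0 then pvD cost i 0 else 0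

theorem pvPhase3_inner (cost : List (List Int)) (R C : Nat) (hC : 0 < C)
    (r : Nat) (hrR : r + 1 < R)
    (dp0 : List (List Int)) (h : pvTab dp0 R C (pvFRow cost r)) :
    ∀ m, m ≤ C - 1 →
    pvTab ((List.range' 1 m).foldl
        (fun dp j => pvSet2 dp (r+1) j
          (pvGet2 cost (r+1) j +
            min (min (pvGet2 dp (r+1) (j-1)) (pvGet2 dp r j)) (pvGet2 dp r (j-1)))) dp0) R C
      (pvFCell cost (r+1) m) := by
  intro m
  induction m with
  | zero =>
    intro _
    rw [List.range'_zero, List.foldl_nil]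
    refine pvTab_congr h ?_
    intro i j hi hj
    unfold pvFRow pvFCell
    by_cases h1 : i ≤ r
    · rw [if_pos h1, if_pos (by omega)]
    · rw [if_neg h1, if_neg (by omega : ¬ i < r + 1)]
      by_cases h2 : i = r + 1
      · rw [if_pos h2]
        by_cases h3 : j = 0
        · subst h3; rw [if_pos rfl, if_pos (by omega), h2]
        · rw [if_neg h3, if_neg (by omega)]
      · rw [if_neg h2]
  | succ t iht =>
    intro hm
    have ih := iht (by omega)
    rw [pvRange'_concat, List.foldl_append, List.foldl_cons, List.foldl_nil]
    rw [show (1 + t - 1 : Nat) = t from by omega]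
    have e1 : pvGet2 ((List.range' 1 t).foldl
        (fun dp j => pvSet2 dp (r+1) j
          (pvGet2 cost (r+1) j +
            min (min (pvGet2 dp (r+1) (j-1)) (pvGet2 dp r j)) (pvGet2 dp r (j-1)))) dp0)
        (r+1) t = pvD cost (r+1) t := by
      rw [ih.2.2 (r+1) t hrR (by omega)]
      unfold pvFCell
      rw [if_neg (by omega), if_pos rfl, if_pos (by omega)]
    have e2 : pvGet2 ((List.range' 1 t).foldl
        (fun dp j => pvSet2 dp (r+1) j
          (pvGet2 cost (r+1) j +
            min (min (pvGet2 dp (r+1) (j-1)) (pvGet2 dp r j)) (pvGet2 dp r (j-1)))) dp0)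
        r (1+t) = pvD cost r (1+t) := by
      rw [ih.2.2 r (1+t) (by omega) (by omega)]
      unfold pvFCell
      rw [if_pos (by omega)]
    have e3 : pvGet2 ((List.range' 1 t).foldl
        (fun dp j => pvSet2 dp (r+1) j
          (pvGet2 cost (r+1) j +
            min (min (pvGet2 dp (r+1) (j-1)) (pvGet2 dp r j)) (pvGet2 dp r (j-1)))) dp0)
        r t = pvD cost r t := by
      rw [ih.2.2 r t (by omega) (by omega)]
      unfold pvFCell
      rw [if_pos (by omega)]
    rw [e1, e2, e3]
    refine pvTab_congr (pvTab_set ih hrR (by omega : 1 + t < C) _) ?_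
    intro i j hi hj
    beta_reduce
    by_cases h1 : i = r + 1 ∧ j = 1 + t
    · obtain ⟨hi0, hjj⟩ := h1; subst hi0; subst hjj
      rw [if_pos ⟨rfl, rfl⟩]
      unfold pvFCell
      rw [if_neg (by omega), if_pos rfl, if_pos (by omega)]
      rw [show (1 + t : Nat) = t + 1 from by omega]
      simp [pvD]
    · rw [if_neg h1]
      unfold pvFCell
      by_cases h2 : i < r + 1
      · rw [if_pos h2, if_pos h2]
      · rw [if_neg h2, if_neg h2]
        by_cases h3 : i = r + 1
        · rw [if_pos h3, if_pos h3]
          by_cases h4 : j ≤ t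
          · rw [if_pos h4, if_pos (by omega)]
          · rw [if_neg h4, if_neg (by omega)]
        · rw [if_neg h3, if_neg h3]

theorem pvPhase3 (cost : List (List Int)) (R C : Nat) (hC : 0 < C)
    (dp0 : List (List Int)) (h : pvTab dp0 R C (pvFRow cost 0)) :
    ∀ k, k ≤ R - 1 →
    pvTab ((List.range' 1 k).foldl
        (fun dp i => (List.range' 1 (C-1)).foldl
          (fun dp j => pvSet2 dp i j
            (pvGet2 cost i j +
              min (min (pvGet2 dp i (j-1)) (pvGet2 dp (i-1) j)) (pvGet2 dp (i-1) (j-1)))) dp) dp0) R C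
      (pvFRow cost k) := by
  intro k
  induction k with
  | zero =>
    intro _
    rw [List.range'_zero, List.foldl_nil]
    exact h
  | succ n ihn =>
    intro hk
    have ih := ihn (by omega)
    rw [pvRange'_concat, List.foldl_append, List.foldl_cons, List.foldl_nil]
    rw [show (1 + n : Nat) = n + 1 from by omega]
    simp only [Nat.add_sub_cancel]
    refine pvTab_congr (pvPhase3_inner cost R C hC n (by omega) _ ih (C-1) le_rfl) ?_
    intro i j hi hj
    unfold pvFCell pvFRow
    by_cases h1 : i < n + 1
    · rw [if_pos h1, if_pos (by omega)]
    · rw [if_neg h1]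
      by_cases h2 : i = n + 1
      · rw [if_pos h2, if_pos (by omega : j ≤ C - 1), if_pos (by omega : i ≤ n + 1), h2]
      · rw [if_neg h2, if_neg (show ¬ i ≤ n + 1 from by omega)]

theorem pvA_eq (cost : List (List Int)) (hR : 0 < cost.length)
    (hC : 0 < (cost.getD 0 []).length) :
    min_cost_path_with_diagonal cost =
      pvD cost (cost.length - 1) ((cost.getD 0 []).length - 1) := by
  have h1 := pvPhase1 cost cost.length (cost.getD 0 []).length hR hC
      ((cost.getD 0 []).length - 1) le_rfl
  have h2 := pvTab_congr (g := fun i j => if i = 0 then pvD cost 0 j else 0) h1 (fun i j hi hj => by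
    beta_reduce
    by_cases hh : i = 0
    · subst hh
      rw [if_pos ⟨rfl, by omega⟩, if_pos rfl]
    · rw [if_neg (by tauto), if_neg hh])
  have h3 := pvPhase2 cost cost.length (cost.getD 0 []).length hR hC _ h2
      (cost.length - 1) le_rfl
  have h4 := pvTab_congr (g := pvFRow cost 0) h3 (fun i j hi hj => by
    unfold pvFRow
    by_cases hh : i = 0
    · subst hh; rw [if_pos rfl, if_pos (by omega)]
    · rw [if_neg hh, if_neg (by omega : ¬ i ≤ 0)]
      by_cases hj0 : j = 0
      · rw [if_pos ⟨hj0, by omega⟩, if_pos hj0]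
      · rw [if_neg (by tauto), if_neg hj0])
  have h5 := pvPhase3 cost cost.length (cost.getD 0 []).length hC _ h4
      (cost.length - 1) le_rfl
  have hval := h5.2.2 (cost.length - 1) ((cost.getD 0 []).length - 1) (by omega) (by omega)
  unfold pvFRow at hval
  rw [if_pos le_rfl] at hval
  unfold min_cost_path_with_diagonal
  exact hval

-- ---- B-side: the memoized recursion computes the same recurrence ----

-- memo invariant: every stored value is the recurrence's value at its key
def pvInv (cost : List (List Int)) (m : PySem.Dict (Nat × Nat) Int) : Prop :=
  ∀ i j v, m.get? (i, j) = some v → v = pvD cost i j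

theorem pvInv_insert {cost : List (List Int)} {m : PySem.Dict (Nat × Nat) Int}
    (h : pvInv cost m) (i j : Nat) :
    pvInv cost (m.insert (i, j) (pvD cost i j)) := by
  intro i' j' v hv
  rw [PySem.Dict.get?_insert] at hv
  split_ifs at hv with hk
  · obtain ⟨rfl, rfl⟩ := Prod.mk.injEq .. ▸ hk
    exact (Option.some.injEq .. ▸ hv).symm
  · exact h i' j' v hv

theorem pvGo_correct (cost : List (List Int)) :
    ∀ n i j memo, i + j ≤ n → pvInv cost memo →
      (pvGo cost i j memo).1 = pvD cost i j ∧ pvInv cost (pvGo cost i j memo).2 := by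
  intro n
  induction n with
  | zero =>
    intro i j memo hn hinv
    have hi : i = 0 := by omega
    have hj : j = 0 := by omega
    subst hi; subst hj
    rw [pvGo.eq_def]
    cases hmem : memo.get? ((0 : Nat), (0 : Nat)) with
    | some v => exact ⟨hinv 0 0 v hmem, hinv⟩
    | none =>
      refine ⟨by simp [pvD], ?_⟩
      have := pvInv_insert hinv 0 0
      simpa [pvD] using this
  | succ n ihn =>
    intro i j memo hn hinv
    rw [pvGo.eq_def]
    cases hmem : memo.get? ((i : Nat), (j : Nat)) with
    | some v => exact ⟨hinv i j v hmem, hinv⟩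
    | none =>
      match i, j with
      | 0, 0 =>
        refine ⟨by simp [pvD], ?_⟩
        have := pvInv_insert hinv 0 0
        simpa [pvD] using this
      | 0, j'+1 =>
        obtain ⟨e, hinv1⟩ := ihn 0 j' memo (by omega) hinv
        refine ⟨by simp [e, pvD]; ring, ?_⟩
        have := pvInv_insert hinv1 0 (j'+1)
        simp only [pvD] at this ⊢
        simpa [e, Int.add_comm] using this
      | i'+1, 0 =>
        obtain ⟨e, hinv1⟩ := ihn i' 0 memo (by omega) hinv
        refine ⟨by simp [e, pvD], ?_⟩
        have := pvInv_insert hinv1 (i'+1) 0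
        simp only [pvD] at this ⊢
        simpa [e] using this
      | i'+1, j'+1 =>
        obtain ⟨e1, hinv1⟩ := ihn (i'+1) j' memo (by omega) hinv
        obtain ⟨e2, hinv2⟩ := ihn i' (j'+1) (pvGo cost (i'+1) j' memo).2 (by omega) hinv1
        obtain ⟨e3, hinv3⟩ := ihn i' j' (pvGo cost i' (j'+1) (pvGo cost (i'+1) j' memo).2).2
            (by omega) hinv2
        refine ⟨by simp [e1, e2, e3, pvD], ?_⟩
        have := pvInv_insert hinv3 (i'+1) (j'+1)
        simp only [pvD] at this ⊢
        simpa [e1, e2, e3] using this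

theorem pvGet?_empty (k : Nat × Nat) :
    (PySem.Dict.empty : PySem.Dict (Nat × Nat) Int).get? k = none := by
  rfl

theorem pvB_eq (cost : List (List Int)) :
    min_cost_path_with_diagonal_alt cost =
      pvD cost (cost.length - 1) ((cost.getD 0 []).length - 1) := by
  have hinv : pvInv cost (PySem.Dict.empty : PySem.Dict (Nat × Nat) Int) := by
    intro i j v hv
    rw [pvGet?_empty] at hv
    exact absurd hv (by simp)
  exact (pvGo_correct cost (cost.length - 1 + ((cost.getD 0 []).length - 1))
      (cost.length - 1) ((cost.getD 0 []).length - 1) PySem.Dict.empty le_rfl hinv).1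

-- ===== VERDICT (by name: the statement is the Claim_ definition above) =====
theorem min_cost_path_with_diagonal_spec : Claim_equal_min_cost_path_with_diagonal := by
  intro cost _ hpre
  obtain ⟨hne, hC, _⟩ := hpre
  have hR : 0 < cost.length := List.length_pos_of_ne_nil hne
  unfold Spec_min_cost_path_with_diagonal
  rw [pvA_eq cost hR hC, pvB_eq cost]
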